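-- pv_equiv track=rewrite | github.com/alexrhogue/advent-of-code | 6/main.py | count_map
-- ===== SOURCE A (Python) =====
-- START_CHAR = '^'
--
-- PATH_CHAR = "X"
--
-- BLOCK_OBSTRUCTION = "O"
--
-- def count_map(map):
-- 	path_size = 0;
-- 	potential_obstructions = 0
--
-- 	for i in range(len(map)):
-- 		for j in range(len(map[i])):
-- 			if map[i][j] in [START_CHAR, PATH_CHAR]:
-- 				path_size += 1
-- 			if map[i][j] == BLOCK_OBSTRUCTION:
-- 				path_size += 1
-- 				potential_obstructions += 1
--
-- 	return (path_size, potential_obstructions)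
-- ===== SOURCE B (Python) =====
-- def count_map(map):
--     cells = [ch for row in map for ch in row]
--     path_size = cells.count('^') + cells.count('X') + cells.count('O')
--     return (path_size, cells.count('O'))
-- ===== Notes on version B (the rewrite author's own statement) =====
-- stated objective: idiomatic
-- what changed: Replaces the index-driven nested loops with per-cell branching by flattening the grid once and deriving both results arithmetically from three count() aggregations.
import Mathlib
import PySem

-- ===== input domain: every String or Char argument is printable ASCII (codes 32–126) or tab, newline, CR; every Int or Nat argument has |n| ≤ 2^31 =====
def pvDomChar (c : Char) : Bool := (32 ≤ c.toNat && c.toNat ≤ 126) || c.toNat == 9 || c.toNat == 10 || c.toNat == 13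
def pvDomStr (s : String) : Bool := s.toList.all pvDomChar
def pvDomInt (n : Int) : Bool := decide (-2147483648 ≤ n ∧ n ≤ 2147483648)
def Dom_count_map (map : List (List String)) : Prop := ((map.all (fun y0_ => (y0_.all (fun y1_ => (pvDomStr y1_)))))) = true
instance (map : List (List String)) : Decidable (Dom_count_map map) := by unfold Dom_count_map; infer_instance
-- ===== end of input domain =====

-- B flattens the grid once and derives both counts from three count() aggregations (idiomatic; same cost).
-- ===== PORT A =====
def count_map (map : List (List String)) : Int × Int :=
  (PySem.List.pyRange 0 (map.length : Int) 1).foldl (fun st i =>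
    let row := PySem.List.pyGetD map i []
    (PySem.List.pyRange 0 (row.length : Int) 1).foldl (fun st j =>
      let c := PySem.List.pyGetD row j ""
      let st1 := if c ∈ ["^", "X"] then (st.1 + 1, st.2) else st
      if c = "O" then (st1.1 + 1, st1.2 + 1) else st1) st) ((0 : Int), (0 : Int))

-- ===== PORT B =====
def count_map_alt (map : List (List String)) : Int × Int :=
  let cells := map.flatMap (fun row => row)
  ((PySem.List.count cells "^" : Int) + (PySem.List.count cells "X" : Int)
      + (PySem.List.count cells "O" : Int),
   (PySem.List.count cells "O" : Int))

-- ===== PRECONDITION & SPEC =====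
def Spec_count_map (map : List (List String)) (out : Int × Int) : Prop := out = count_map_alt map
instance (map : List (List String)) (out : Int × Int) : Decidable (Spec_count_map map out) := by unfold Spec_count_map; infer_instance

-- ===== CLAIM (what is proved, stated in full; the proofs are below) =====
def Claim_equal_count_map : Prop := ∀ (map : List (List String)), Dom_count_map map → Spec_count_map map (count_map map)

-- ===== LEMMAS AND PROOFS =====

-- ===== VERDICT (by name: the statement is the Claim_ definition above) =====
-- the inner cell-processing step of A
def pvStep (st : Int × Int) (c : String) : Int × Int :=
  let st1 := if c ∈ ["^", "X"] then (st.1 + 1, st.2) else st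
  if c = "O" then (st1.1 + 1, st1.2 + 1) else st1

theorem pvFold_count (cells : List String) : ∀ (p o : Int),
    cells.foldl pvStep (p, o)
      = (p + cells.count "^" + cells.count "X" + cells.count "O", o + cells.count "O") := by
  induction cells with
  | nil => intro p o; simp
  | cons c t ih =>
    intro p o
    by_cases h1 : c = "^" <;> by_cases h2 : c = "X" <;> by_cases h3 : c = "O" <;>
      simp [pvStep, List.count_cons, h1, h2, h3, ih] <;> omega

theorem count_map_spec : Claim_equal_count_map := by
  intro m _
  unfold Spec_count_map count_map count_map_alt
  rw [PySem.List.foldl_pyRange_zero_pyGetD' m [] (fun st row =>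
      (PySem.List.pyRange 0 (row.length : Int) 1).foldl (fun st j =>
        let c := PySem.List.pyGetD row j ""
        let st1 := if c ∈ ["^", "X"] then (st.1 + 1, st.2) else st
        if c = "O" then (st1.1 + 1, st1.2 + 1) else st1) st) ((0:Int),(0:Int))]
  have hrow : ∀ (row : List String) (st : Int × Int),
      (PySem.List.pyRange 0 (row.length : Int) 1).foldl (fun st j =>
        let c := PySem.List.pyGetD row j ""
        let st1 := if c ∈ ["^", "X"] then (st.1 + 1, st.2) else st
        if c = "O" then (st1.1 + 1, st1.2 + 1) else st1) st = row.foldl pvStep st := by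
    intro row st
    exact PySem.List.foldl_pyRange_zero_pyGetD' row "" pvStep st
  simp only [hrow]
  rw [← List.foldl_flatten (f := pvStep), pvFold_count]
  simp [PySem.List.count_eq, List.flatMap_id']
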